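-- pv_equiv track=rewrite | github.com/data4goodlab/ScienceDynamics | ScienceDynamics/datasets/mag_authors.py | _entities_years_list_to_dict
-- ===== SOURCE A (Python) =====
-- def _entities_years_list_to_dict(l):
--     """
--     Create a dict of entites by year
--     :param l: list which each element is a size two tuple (year, entity_id
--     :return: a dict in which each key is a year and each value is a list of entities
--     :rtype: dict<int,list>
--     """
--     d = {}
--     for y, eid in l:
--         y = str(y)  # for easier mongo insert key need to be str
--         if y not in d:
--             d[y] = []
--         d[y].append(eid)
--     return d
-- ===== SOURCE B (Python) =====
-- def _entities_years_list_to_dict(l):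
--     """Two-pass rewrite: dedup the stringified years first, then gather each
--     key's entities with a comprehension (no incremental dict mutation)."""
--     keys = list(dict.fromkeys(str(y) for y, _ in l))
--     return {k: [eid for y, eid in l if str(y) == k] for k in keys}
-- ===== Notes on version B (the rewrite author's own statement) =====
-- stated objective: alternative
-- what changed: A builds the dict in one incremental scan with a membership check and in-place append; B first deduplicates the stringified years (dict.fromkeys) and then builds each year's entity list with a separate filtering comprehension per key.
import Mathlib
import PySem

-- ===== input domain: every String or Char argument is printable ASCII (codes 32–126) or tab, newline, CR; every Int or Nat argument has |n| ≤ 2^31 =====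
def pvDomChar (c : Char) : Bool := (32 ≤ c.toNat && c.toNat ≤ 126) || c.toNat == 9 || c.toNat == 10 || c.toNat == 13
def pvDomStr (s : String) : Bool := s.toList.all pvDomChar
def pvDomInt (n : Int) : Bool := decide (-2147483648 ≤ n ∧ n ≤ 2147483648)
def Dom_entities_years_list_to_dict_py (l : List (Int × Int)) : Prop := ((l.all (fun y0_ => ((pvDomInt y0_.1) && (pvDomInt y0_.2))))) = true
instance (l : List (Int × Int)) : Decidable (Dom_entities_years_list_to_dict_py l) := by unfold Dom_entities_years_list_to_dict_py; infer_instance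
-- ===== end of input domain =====

-- B replaces A's incremental dict-building scan by a dedup-keys pass plus one filtering pass per key (objective: alternative, same results).

-- ===== PORT A =====
-- A: d = {}; for y, eid in l: y = str(y); if y not in d: d[y] = []; d[y].append(eid); return d
def entities_years_list_to_dict_py (l : List (Int × Int)) : List (String × List Int) :=
  (l.foldl
    (fun (d : PySem.Dict String (List Int)) p =>
      let y := PySem.Int.toStr p.1
      let d := if d.contains y then d else d.insert y []
      d.modify y [] (fun v => v ++ [p.2]))
    PySem.Dict.empty).items

-- ===== PORT B =====
-- B: keys = list(dict.fromkeys(str(y) for y, _ in l)); {k: [eid for y, eid in l if str(y) == k] for k in keys}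
def entities_years_list_to_dict_py_alt (l : List (Int × Int)) : List (String × List Int) :=
  let keys := PySem.List.dedup (l.map (fun p => PySem.Int.toStr p.1))
  keys.map (fun k => (k, (l.filter (fun p => PySem.Int.toStr p.1 == k)).map (·.2)))

-- ===== PRECONDITION & SPEC =====
def Spec_entities_years_list_to_dict_py (l : List (Int × Int)) (out : List (String × List Int)) : Prop := out = entities_years_list_to_dict_py_alt l
instance (l : List (Int × Int)) (out : List (String × List Int)) : Decidable (Spec_entities_years_list_to_dict_py l out) := by unfold Spec_entities_years_list_to_dict_py; infer_instance

-- ===== CLAIM (what is proved, stated in full; the proofs are below) =====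
def Claim_equal_entities_years_list_to_dict_py : Prop := ∀ (l : List (Int × Int)), Dom_entities_years_list_to_dict_py l → Spec_entities_years_list_to_dict_py l (entities_years_list_to_dict_py l)

-- ===== LEMMAS AND PROOFS =====

-- A's body per element equals a single 'modify' step.
theorem pvStep_eq_modify (d : PySem.Dict String (List Int)) (p : Int × Int) :
    (let y := PySem.Int.toStr p.1
     let d := if d.contains y then d else d.insert y []
     d.modify y [] (fun v => v ++ [p.2]))
    = d.modify (PySem.Int.toStr p.1) [] (fun v => v ++ [p.2]) := by
  set y := PySem.Int.toStr p.1
  by_cases h : d.contains y = true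
  · simp [h]
  · simp only [Bool.not_eq_true] at h
    simp [h, PySem.Dict.modify, PySem.Dict.getD_insert_self, PySem.Dict.insert_insert_self]
    rw [PySem.Dict.getD_of_not_contains (h := h)]; rfl

theorem pvFold_eq (l : List (Int × Int)) (d : PySem.Dict String (List Int)) :
    l.foldl
      (fun (d : PySem.Dict String (List Int)) p =>
        let y := PySem.Int.toStr p.1
        let d := if d.contains y then d else d.insert y []
        d.modify y [] (fun v => v ++ [p.2])) d
    = (l.map (fun p => (PySem.Int.toStr p.1, p.2))).foldl
        (fun (d : PySem.Dict String (List Int)) p => d.modify p.1 [] (fun v => v ++ [p.2])) d := by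
  have hstep : (fun (d : PySem.Dict String (List Int)) (p : Int × Int) =>
      let y := PySem.Int.toStr p.1
      let d := if d.contains y then d else d.insert y []
      d.modify y [] (fun v => v ++ [p.2]))
      = (fun (d : PySem.Dict String (List Int)) (p : Int × Int) =>
          d.modify (PySem.Int.toStr p.1) [] (fun v => v ++ [p.2])) := by
    funext d p; exact pvStep_eq_modify d p
  rw [hstep, List.foldl_map]

-- ===== VERDICT (by name: the statement is the Claim_ definition above) =====
theorem entities_years_list_to_dict_py_spec : Claim_equal_entities_years_list_to_dict_py := by
  intro l _
  show _ = _
  unfold entities_years_list_to_dict_py entities_years_list_to_dict_py_alt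
  rw [pvFold_eq]
  set m := l.map (fun p => (PySem.Int.toStr p.1, p.2)) with hm
  set D := m.foldl (fun (d : PySem.Dict String (List Int)) p => d.modify p.1 [] (fun v => v ++ [p.2])) PySem.Dict.empty with hD
  have hnd : D.keys.Nodup := by
    rw [hD]
    exact PySem.Dict.nodup_keys_foldl_modify_key m (fun p => p.1) [] (fun _ p => fun v => v ++ [p.2]) PySem.Dict.empty (by simp)
  have hkeys : D.keys = PySem.List.dedup (l.map (fun p => PySem.Int.toStr p.1)) := by
    rw [hD, PySem.Dict.keys_foldl_modify_key m (fun p => p.1) [] (fun _ p => fun v => v ++ [p.2]) PySem.Dict.empty]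
    simp [PySem.Set.update, PySem.Set.ofList_eq_foldl, hm, List.map_map, Function.comp_def]
  rw [PySem.Dict.items_eq_map_keys D hnd [], hkeys]
  apply List.map_congr_left
  intro k hk
  have : D.getD k [] = (m.filter (fun p => p.1 == k)).map (·.2) := by
    rw [hD, PySem.Dict.getD_foldl_modify_append]
    simp [PySem.Dict.getD_empty]
  rw [this, hm]
  simp [List.filter_map, List.map_map, Function.comp_def]
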